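-- pv_equiv track=rewrite | github.com/swff07183/BOJ | gaji_muchim/0618/C_4889.py | stable
-- ===== SOURCE A (Python) =====
-- def stable(word):
--     stack = []
--     # 일단 word 한번 순회하면서 {} 있으면 다 지워주기
--     for c in word:
--         if c == '}' and len(stack) and stack[-1]=='{':
--             stack.pop()
--         else:
--             stack.append(c)
--     """
--
--     } }
--     { {
--     } {
--     """
--     # 그럼 남는 패턴은 }}, {{, } { 가 된다.
--
--     result = 0
--     for i in range(1, len(stack), 2):
--         if stack[i]==stack[i-1]:
--             # } } , { { => {}
--             result += 1
--         else:
--             # } { => {}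
--             result += 2
--     return result
-- ===== SOURCE B (Python) =====
-- def stable(word):
--     # Phase 1: keep permanent residual chars in `res` plus a counter of
--     # trailing '{' (the only chars that can still be cancelled).
--     res = []
--     opens = 0
--     for c in word:
--         if c == '{':
--             opens += 1
--         elif c == '}' and opens:
--             opens -= 1
--         else:
--             res.extend('{' * opens)
--             res.append(c)
--             opens = 0
--     res.extend('{' * opens)
--     # Phase 2: score consecutive pairs.
--     total = 0
--     it = iter(res)
--     for x, y in zip(it, it):
--         total += 1 if x == y else 2
--     return total
-- ===== Notes on version B (the rewrite author's own statement) =====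
-- stated objective: alternative
-- what changed: Replaces A's per-character stack with pop/append (then an index loop over odd positions) by a permanent-residual list plus a counter of trailing '{' that is flushed when a non-cancellable character arrives, and scores the residual by structural pairing over consecutive pairs instead of indexed range(1,len,2) access.
import Mathlib
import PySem

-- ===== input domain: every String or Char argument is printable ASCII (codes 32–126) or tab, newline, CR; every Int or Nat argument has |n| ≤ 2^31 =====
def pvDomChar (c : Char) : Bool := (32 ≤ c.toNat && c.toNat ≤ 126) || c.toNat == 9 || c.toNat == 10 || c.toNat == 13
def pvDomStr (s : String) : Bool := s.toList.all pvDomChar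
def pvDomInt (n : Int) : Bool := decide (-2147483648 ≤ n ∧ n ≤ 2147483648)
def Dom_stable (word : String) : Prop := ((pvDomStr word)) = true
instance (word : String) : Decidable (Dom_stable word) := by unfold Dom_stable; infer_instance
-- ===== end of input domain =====

-- B replaces A's generic stack (pop/append per char) by a permanent-residual list plus a
-- counter of trailing '{', and scores the residual by structural pairing; objective: alternative.

-- ===== PORT A =====
-- stack update for one character: pop a matched '{', otherwise push
def stableStep (st : List Char) (c : Char) : List Char :=
  if c = '}' ∧ st.length ≠ 0 ∧ PySem.List.pyGet? st (-1) = some '{' then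
    st.dropLast
  else
    st ++ [c]

def stable (word : String) : Int :=
  let stack := word.toList.foldl stableStep []
  (PySem.List.pyRange 1 (stack.length : Int) 2).foldl
    (fun result i =>
      if PySem.List.pyGet? stack i = PySem.List.pyGet? stack (i - 1) then result + 1
      else result + 2) 0

-- ===== PORT B =====
-- one character of B's phase 1: count trailing '{'s, flush them when a permanent char arrives
def stableFlush (res : List Char) (opens : Nat) (c : Char) : List Char × Nat :=
  if c = '{' then (res, opens + 1)
  else if c = '}' ∧ opens ≠ 0 then (res, opens - 1)
  else (res ++ List.replicate opens '{' ++ [c], 0)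

-- B's phase 2: total over consecutive pairs (zip(it, it))
def pairScore (acc : Int) : List Char → Int
  | x :: y :: rest => pairScore (acc + if x = y then 1 else 2) rest
  | _ => acc

def stable_alt (word : String) : Int :=
  let p := word.toList.foldl (fun (s : List Char × Nat) c => stableFlush s.1 s.2 c) ([], 0)
  pairScore 0 (p.1 ++ List.replicate p.2 '{')

-- ===== PRECONDITION & SPEC =====
def Spec_stable (word : String) (out : Int) : Prop := out = stable_alt word
instance (word : String) (out : Int) : Decidable (Spec_stable word out) := by unfold Spec_stable; infer_instance

-- ===== CLAIM (what is proved, stated in full; the proofs are below) =====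
def Claim_equal_stable : Prop := ∀ (word : String), Dom_stable word → Spec_stable word (stable word)

-- ===== LEMMAS AND PROOFS =====

-- A's residual stack equals B's (permanent residual, trailing-open counter) state,
-- provided the permanent residual never ends with '{'.
theorem phase1_eq : ∀ (l res : List Char) (opens : Nat), res.getLast? ≠ some '{' →
    l.foldl stableStep (res ++ List.replicate opens '{')
      = (let p := l.foldl (fun (s : List Char × Nat) c => stableFlush s.1 s.2 c) (res, opens)
         p.1 ++ List.replicate p.2 '{')
  | [], res, opens, h => by simp
  | c :: l, res, opens, h => by
    by_cases hc1 : c = '{'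
    · subst hc1
      have hA : stableStep (res ++ List.replicate opens '{') '{'
          = res ++ List.replicate (opens + 1) '{' := by
        simp [stableStep, List.replicate_succ']
      simp only [List.foldl_cons, hA, stableFlush]
      exact phase1_eq l res (opens + 1) h
    · by_cases hc2 : c = '}'
      · subst hc2
        cases opens with
        | zero =>
          have hA : stableStep (res ++ List.replicate 0 '{') '}' = res ++ ['}'] := by
            rw [stableStep, if_neg]
            · simp
            · rw [PySem.List.pyGet?_neg_one]
              rintro ⟨-, -, hl⟩
              simp at hl
              exact h hl
          simp only [List.foldl_cons, hA, stableFlush, hc1]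
          have := phase1_eq l (res ++ ['}']) 0 (by simp)
          simpa [stableFlush, hc1] using this
        | succ k =>
          have hA : stableStep (res ++ List.replicate (k + 1) '{') '}'
              = res ++ List.replicate k '{' := by
            have hlast : PySem.List.pyGet? (res ++ List.replicate (k + 1) '{') (-1) = some '{' := by
              rw [PySem.List.pyGet?_neg_one]
              simp [List.getLast?_append, List.getLast?_replicate]
            rw [stableStep, if_pos ⟨rfl, by simp, hlast⟩]
            rw [List.replicate_succ', ← List.append_assoc]
            simp
          simp only [List.foldl_cons, hA, stableFlush, hc1]
          have := phase1_eq l res k h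
          simpa [stableFlush, hc1] using this
      · have hA : stableStep (res ++ List.replicate opens '{') c
            = (res ++ List.replicate opens '{') ++ [c] := by
          simp [stableStep, hc2]
        simp only [List.foldl_cons, hA, stableFlush, hc1, hc2]
        have := phase1_eq l ((res ++ List.replicate opens '{') ++ [c]) 0
          (by simp [hc1])
        simpa [stableFlush, hc1, hc2] using this

-- A's indexed pair loop, as a sum
def idxScore (st : List Char) : Int :=
  ((PySem.List.pyRange 1 (st.length : Int) 2).map
    (fun i => if PySem.List.pyGet? st i = PySem.List.pyGet? st (i - 1) then (1 : Int) else 2)).sum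

theorem pairScore_acc : ∀ (l : List Char) (acc : Int), pairScore acc l = acc + pairScore 0 l
  | [], acc => by simp [pairScore]
  | [x], acc => by simp [pairScore]
  | x :: y :: rest, acc => by
    show pairScore (acc + if x = y then 1 else 2) rest
      = acc + pairScore (0 + if x = y then 1 else 2) rest
    rw [pairScore_acc rest, pairScore_acc rest (0 + if x = y then 1 else 2)]
    ring

theorem pyRange_two (m : List Char) : PySem.List.pyRange 1 (m.length : Int) 2
    = (List.range (m.length / 2)).map (fun (k : Nat) => 1 + 2 * (k : Int)) := by
  rw [PySem.List.pyRange_of_pos 1 (m.length : Int) (by norm_num : (0:Int) < 2)]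
  have hcnt : (if (1:Int) < (m.length : Int) then (((m.length : Int) - 1 + 2 - 1) / 2).toNat else 0)
      = m.length / 2 := by
    split <;> omega
  rw [hcnt]

theorem idxScore_eq : ∀ (st : List Char), idxScore st = pairScore 0 st
  | [] => by
    simp [idxScore, pairScore, show PySem.List.pyRange 1 0 2 = [] from rfl]
  | [x] => by
    simp [idxScore, pairScore, show PySem.List.pyRange 1 1 2 = [] from rfl]
  | x :: y :: rest => by
    have ih := idxScore_eq rest
    unfold idxScore at ih ⊢
    rw [pyRange_two (x :: y :: rest)]
    rw [pyRange_two rest] at ih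
    rw [List.map_map] at ih ⊢
    have hlen : (x :: y :: rest).length / 2 = rest.length / 2 + 1 := by
      simp only [List.length_cons]; omega
    rw [hlen, List.range_succ_eq_map, List.map_cons, List.map_map, List.sum_cons]
    have hhead : ((fun i => if PySem.List.pyGet? (x :: y :: rest) i
          = PySem.List.pyGet? (x :: y :: rest) (i - 1) then (1:Int) else 2)
        ∘ fun (k : Nat) => 1 + 2 * (k : Int)) 0 = (if x = y then (1:Int) else 2) := by
      simp only [Function.comp_apply, Nat.cast_zero, mul_zero, add_zero]
      have h1 : PySem.List.pyGet? (x :: y :: rest) 1 = some y := by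
        rw [show (1:Int) = ((1:Nat):Int) by norm_num, PySem.List.pyGet?_natCast]; rfl
      have h0 : PySem.List.pyGet? (x :: y :: rest) (1 - 1) = some x := by norm_num
      rw [h1, h0]
      by_cases h : x = y
      · simp [h]
      · simp [h, Ne.symm h]
    have htail : (List.range (rest.length / 2)).map
        (((fun i => if PySem.List.pyGet? (x :: y :: rest) i
            = PySem.List.pyGet? (x :: y :: rest) (i - 1) then (1:Int) else 2)
          ∘ fun (k : Nat) => 1 + 2 * (k : Int)) ∘ fun n => n + 1)
        = (List.range (rest.length / 2)).map
          ((fun i => if PySem.List.pyGet? rest i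
            = PySem.List.pyGet? rest (i - 1) then (1:Int) else 2)
          ∘ fun (k : Nat) => 1 + 2 * (k : Int)) := by
      apply List.map_congr_left
      intro k _
      simp only [Function.comp_apply]
      have e1 : (1 + 2 * (((k + 1) : Nat) : Int)) = ((2*k+3 : Nat) : Int) := by push_cast; ring
      have e2 : (1 + 2 * (((k + 1) : Nat) : Int)) - 1 = ((2*k+2 : Nat) : Int) := by push_cast; ring
      have e3 : (1 + 2 * ((k : Nat) : Int)) = ((2*k+1 : Nat) : Int) := by push_cast; ring
      have e4 : (1 + 2 * ((k : Nat) : Int)) - 1 = ((2*k : Nat) : Int) := by push_cast; ring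
      rw [e2, e1, e4, e3, PySem.List.pyGet?_natCast, PySem.List.pyGet?_natCast,
        PySem.List.pyGet?_natCast, PySem.List.pyGet?_natCast]
      have g1 : (x :: y :: rest)[2*k+3]? = rest[2*k+1]? := by
        simp [show 2*k+3 = (2*k+1)+1+1 by ring]
      have g2 : (x :: y :: rest)[2*k+2]? = rest[2*k]? := by
        simp [show 2*k+2 = (2*k)+1+1 by ring]
      rw [g1, g2]
    rw [hhead, htail, ih]
    have hp : pairScore 0 (x :: y :: rest) = (0 + if x = y then (1:Int) else 2) + pairScore 0 rest :=
      pairScore_acc rest _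
    rw [hp]
    ring

-- ===== VERDICT (by name: the statement is the Claim_ definition above) =====
theorem stable_spec : Claim_equal_stable := by
  intro word _
  show stable word = stable_alt word
  have h1 : word.toList.foldl stableStep [] =
      (word.toList.foldl (fun (s : List Char × Nat) c => stableFlush s.1 s.2 c) ([], 0)).1
        ++ List.replicate
            (word.toList.foldl (fun (s : List Char × Nat) c => stableFlush s.1 s.2 c) ([], 0)).2 '{' := by
    have := phase1_eq word.toList [] 0 (by simp)
    simpa using this
  simp only [stable, stable_alt]
  rw [h1]
  have h2 : ∀ (st : List Char),
      (PySem.List.pyRange 1 (st.length : Int) 2).foldl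
        (fun result i =>
          if PySem.List.pyGet? st i = PySem.List.pyGet? st (i - 1) then result + 1
          else result + 2) 0 = pairScore 0 st := by
    intro st
    have hfun : ∀ (r : Int) (i : Int),
        (if PySem.List.pyGet? st i = PySem.List.pyGet? st (i - 1) then r + 1 else r + 2)
        = r + (if PySem.List.pyGet? st i = PySem.List.pyGet? st (i - 1) then (1:Int) else 2) := by
      intro r i; split <;> rfl
    calc (PySem.List.pyRange 1 (st.length : Int) 2).foldl
          (fun result i =>
            if PySem.List.pyGet? st i = PySem.List.pyGet? st (i - 1) then result + 1
            else result + 2) 0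
        = (PySem.List.pyRange 1 (st.length : Int) 2).foldl
          (fun result i => result +
            (if PySem.List.pyGet? st i = PySem.List.pyGet? st (i - 1) then (1:Int) else 2)) 0 := by
          apply PySem.List.foldl_congr_mem
          intro r i _
          exact hfun r i
      _ = idxScore st := by
          rw [PySem.List.foldl_add]
          simp [idxScore]
      _ = pairScore 0 st := idxScore_eq st
  rw [h2]
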